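-- pv_equiv track=rewrite | github.com/konszymanski/leetcode-dataset | obfuscated_solutions/python/0564-find-the-closest-palindrome/solution_1_l0_l2_l3.py | half_to_palindrome
-- ===== SOURCE A (Python) =====
-- def half_to_palindrome(left: int, even: bool) -> int:
--     res = left
--     if not even:
--         left = left // 10
--     while left > 0:
--         res = res * 10 + left % 10
--         if len('abc') == 3:
--             left = left // 10
--     return res
-- ===== SOURCE B (Python) =====
-- def half_to_palindrome(left: int, even: bool) -> int:
--     s = str(left)
--     half = s if even else s[:-1]
--     res = left
--     for ch in reversed(half):
--         res = res * 10 + (ord(ch) - ord('0'))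
--     return res
-- ===== Notes on version B (the rewrite author's own statement) =====
-- stated objective: alternative
-- what changed: Replaces A's arithmetic digit-peeling loop (repeated //10 and %10 on the number) with mirroring the decimal string: take str(left), drop the last character for the odd case, reverse that half and fold its characters back onto the number.
-- outside the precondition, e.g. on half_to_palindrome(-5, True): A returns -5, B returns -453
import Mathlib
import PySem

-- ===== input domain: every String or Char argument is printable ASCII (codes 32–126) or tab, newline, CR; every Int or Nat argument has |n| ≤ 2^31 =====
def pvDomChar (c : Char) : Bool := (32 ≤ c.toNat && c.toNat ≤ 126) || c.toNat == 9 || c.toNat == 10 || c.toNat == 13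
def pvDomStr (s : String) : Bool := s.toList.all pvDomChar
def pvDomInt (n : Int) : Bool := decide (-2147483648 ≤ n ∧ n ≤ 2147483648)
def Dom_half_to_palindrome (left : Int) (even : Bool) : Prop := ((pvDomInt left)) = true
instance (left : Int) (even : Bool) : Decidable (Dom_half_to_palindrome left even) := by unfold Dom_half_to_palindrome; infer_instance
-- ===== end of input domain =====

-- B mirrors the decimal STRING of `left` (drop the last character for the odd case, reverse,
-- fold the characters back on) instead of A's arithmetic //10 / %10 digit-peeling loop; same cost.

-- ===== PORT A =====
-- A's while loop: `while left > 0: res = res * 10 + left % 10; left = left // 10`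
-- (the `if len('abc') == 3` guard is always true, so the decrement runs every iteration)
def pvALoop (left res : Int) : Int :=
  if h : left > 0 then
    pvALoop (PySem.Int.floordiv left 10) (res * 10 + PySem.Int.mod left 10)
  else
    res
termination_by left.toNat
decreasing_by
  have h1 : PySem.Int.floordiv left 10 = left / 10 :=
    PySem.Int.floordiv_eq_ediv_of_pos (by omega)
  omega

def half_to_palindrome (left : Int) (even : Bool) : Int :=
  let res := left
  let left := if !even then PySem.Int.floordiv left 10 else left
  pvALoop left res

-- ===== PORT B =====
-- s = str(left); half = s if even else s[:-1]; res = left;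
-- for ch in reversed(half): res = res * 10 + (ord(ch) - ord('0'))
-- ord(ch) is exact as ch.toNat (the Unicode code point); ord('0') = 48.
def half_to_palindrome_alt (left : Int) (even : Bool) : Int :=
  let s := PySem.Int.toChars left
  let half := if even then s else PySem.List.slice s none (some (-1))
  half.reverse.foldl (fun res ch => res * 10 + ((ch.toNat : Int) - 48)) left

-- ===== PRECONDITION & SPEC =====
-- Pre_ restricts to the function's natural domain (left is a non-negative half-number):
-- on negative left, A's loop never runs and A returns `left` unchanged, while B's string
-- mirroring reads the '-' sign as a digit and returns a different value.
def Pre_half_to_palindrome (left : Int) (even : Bool) : Prop := 0 ≤ left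
instance (left : Int) (even : Bool) : Decidable (Pre_half_to_palindrome left even) := by
  unfold Pre_half_to_palindrome; infer_instance

def pvWitness_half_to_palindrome : Int × Bool := (123, false)

def Spec_half_to_palindrome (left : Int) (even : Bool) (out : Int) : Prop := out = half_to_palindrome_alt left even
instance (left : Int) (even : Bool) (out : Int) : Decidable (Spec_half_to_palindrome left even out) := by unfold Spec_half_to_palindrome; infer_instance

-- ===== CLAIM (what is proved, stated in full; the proofs are below) =====
def Claim_equal_half_to_palindrome : Prop := ∀ (left : Int) (even : Bool), Dom_half_to_palindrome left even → Pre_half_to_palindrome left even → Spec_half_to_palindrome left even (half_to_palindrome left even)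

-- ===== LEMMAS AND PROOFS =====
theorem pvALoop_eq_foldl (x res : Int) (hx : 0 ≤ x) :
    pvALoop x res =
      (Nat.digits 10 x.toNat).foldl (fun (r : Int) (d : ℕ) => r * 10 + (d : Int)) res := by
  generalize hk : x.toNat = k
  induction k using Nat.strong_induction_on generalizing x res with
  | _ k ih =>
    rcases Nat.eq_zero_or_pos k with h0 | hpos
    · subst h0
      have hx0 : x = 0 := by omega
      subst hx0
      rw [pvALoop]
      simp
    · have hxpos : 0 < x := by omega
      rw [pvALoop, dif_pos (by omega)]
      have hfd : PySem.Int.floordiv x 10 = x / 10 :=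
        PySem.Int.floordiv_eq_ediv_of_pos (by omega)
      have hmd : PySem.Int.mod x 10 = x % 10 :=
        PySem.Int.mod_eq_emod_of_pos (by omega)
      rw [hfd, hmd]
      have h1 : (x / 10).toNat = k / 10 := by omega
      have hlt : k / 10 < k := Nat.div_lt_self hpos (by omega)
      rw [Nat.digits_def' (b := 10) (by omega) hpos, List.foldl_cons,
        ih (k / 10) hlt (x / 10) _ (by positivity) h1]
      congr 1
      push_cast
      omega

theorem pvToDigitsCore_eq (f : ℕ) : ∀ (n : ℕ) (acc : List Char), 0 < n → n < 10 ^ f →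
    Nat.toDigitsCore 10 f n acc =
      ((Nat.digits 10 n).map Nat.digitChar).reverse ++ acc := by
  induction f with
  | zero => intro n acc hn hf; omega
  | succ f ih =>
    intro n acc hn hf
    rw [Nat.toDigitsCore]
    by_cases h : n / 10 = 0
    · have h10 : n < 10 := by omega
      simp only [h, if_true]
      rw [Nat.digits_def' (by omega) hn, h, Nat.digits_zero]
      simp [Nat.mod_eq_of_lt h10]
    · simp only [h, if_false]
      rw [ih (n / 10) _ (by omega) (by
        have : n < 10 ^ f * 10 := by rw [← pow_succ]; exact hf
        omega)]
      rw [Nat.digits_def' (b := 10) (by omega) hn]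
      simp

theorem pvToChars_pos (m : ℕ) (hm : 0 < m) :
    PySem.Int.toChars (m : Int) = ((Nat.digits 10 m).map Nat.digitChar).reverse := by
  rw [PySem.Int.toChars]
  rw [if_neg (by omega)]
  simp only [Int.toNat_natCast]
  rw [Nat.toDigits, pvToDigitsCore_eq (m + 1) m [] hm (by
    calc m < 10 ^ m := Nat.lt_pow_self (by omega)
    _ ≤ 10 ^ (m + 1) := Nat.pow_le_pow_right (by omega) (by omega))]
  simp

theorem pvDigitChar_toNat (d : ℕ) (hd : d < 10) : ((Nat.digitChar d).toNat : Int) - 48 = d := by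
  interval_cases d <;> decide

theorem pvFold_map_digitChar (ds : List ℕ) (hds : ∀ d ∈ ds, d < 10) (res : Int) :
    (ds.map Nat.digitChar).foldl (fun (r : Int) (c : Char) => r * 10 + ((c.toNat : Int) - 48)) res =
      ds.foldl (fun (r : Int) (d : ℕ) => r * 10 + (d : Int)) res := by
  induction ds generalizing res with
  | nil => rfl
  | cons d ds ih =>
    simp only [List.map_cons, List.foldl_cons]
    rw [pvDigitChar_toNat d (hds d (by simp))]
    exact ih (fun x hx => hds x (by simp [hx])) _

theorem pv_main (left : Int) (even : Bool) (hpre : 0 ≤ left) :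
    half_to_palindrome left even = half_to_palindrome_alt left even := by
  rcases Nat.eq_zero_or_pos left.toNat with h0 | hpos
  · have : left = 0 := by omega
    subst this
    cases even with
    | true =>
      show pvALoop 0 0 = _
      rw [pvALoop]
      decide
    | false =>
      show pvALoop (PySem.Int.floordiv 0 10) 0 = _
      have h : PySem.Int.floordiv 0 10 = 0 := by decide
      rw [h, pvALoop]
      decide
  · obtain ⟨m, hm⟩ : ∃ m : ℕ, left = (m : Int) := ⟨left.toNat, by omega⟩
    subst hm
    have hmpos : 0 < m := by omega
    have hdigs : ∀ d ∈ Nat.digits 10 m, d < 10 := fun d hd => Nat.digits_lt_base (by omega) hd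
    have hchars := pvToChars_pos m hmpos
    cases even with
    | true =>
      show pvALoop (m : Int) (m : Int) = _
      rw [pvALoop_eq_foldl _ _ (by positivity)]
      show _ = (PySem.Int.toChars (m : Int)).reverse.foldl _ _
      rw [hchars, List.reverse_reverse, pvFold_map_digitChar _ hdigs]
      simp
    | false =>
      show pvALoop (PySem.Int.floordiv (m : Int) 10) (m : Int) = _
      rw [PySem.Int.floordiv_eq_ediv_of_pos (by omega), pvALoop_eq_foldl _ _ (by positivity)]
      show _ = (PySem.List.slice (PySem.Int.toChars (m : Int)) none (some (-1))).reverse.foldl _ _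
      rw [PySem.List.slice_to_neg_one, hchars, List.dropLast_reverse, List.reverse_reverse,
        ← List.map_tail, Nat.digits_def' (b := 10) (by omega) hmpos, List.tail_cons,
        pvFold_map_digitChar _ (fun d hd => Nat.digits_lt_base (by omega) hd)]
      have : ((m : Int) / 10).toNat = m / 10 := by omega
      rw [this]

-- ===== VERDICT (by name: the statement is the Claim_ definition above) =====
theorem half_to_palindrome_spec : Claim_equal_half_to_palindrome := by
  intro left even _ hpre
  unfold Spec_half_to_palindrome
  exact pv_main left even hpre
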